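-- pv_equiv track=rewrite | github.com/Jonathan-Hoch/dxa-extractor | dxa_extractor_gui.py | fix_doubled_chars
-- ===== SOURCE A (Python) =====
-- def fix_doubled_chars(text):
--     result = []
--     i = 0
--     while i < len(text):
--         if i + 1 < len(text) and text[i] == text[i + 1]:
--             result.append(text[i])
--             i += 2
--         else:
--             result.append(text[i])
--             i += 1
--     return "".join(result)
-- ===== SOURCE B (Python) =====
-- def fix_doubled_chars(text):
--     out = []
--     i = 0
--     n = len(text)
--     while i < n:
--         j = i + 1
--         while j < n and text[j] == text[i]:
--             j += 1
--         L = j - i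
--         out.append(text[i] * ((L + 1) // 2))
--         i = j
--     return "".join(out)
-- ===== Notes on version B (the rewrite author's own statement) =====
-- stated objective: alternative
-- what changed: B scans each maximal run of equal characters with an inner loop and emits ceil(L/2) copies of the character per run, instead of A's per-character pairwise stepping (i+=2 on a match).
import Mathlib
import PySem

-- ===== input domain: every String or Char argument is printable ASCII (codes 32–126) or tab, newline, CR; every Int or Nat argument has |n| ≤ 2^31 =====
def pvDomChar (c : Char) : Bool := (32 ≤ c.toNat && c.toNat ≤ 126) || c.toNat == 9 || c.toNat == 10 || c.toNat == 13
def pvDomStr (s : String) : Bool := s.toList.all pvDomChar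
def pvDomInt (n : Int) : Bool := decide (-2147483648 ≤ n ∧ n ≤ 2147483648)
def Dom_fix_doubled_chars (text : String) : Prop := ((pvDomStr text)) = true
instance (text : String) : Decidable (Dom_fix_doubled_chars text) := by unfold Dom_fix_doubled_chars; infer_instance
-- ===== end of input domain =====

-- B collapses each maximal run of equal characters to ceil(L/2) copies in one scan,
-- instead of A's per-character pair stepping (objective: simpler/alternative; return value only).

-- ===== PORT A =====
-- A's index loop: look at text[i] and text[i+1]; on a match emit once and skip 2, else emit and skip 1.
def pvLoopA : List Char → List Char
  | [] => []
  | [c] => [c]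
  | a :: b :: rest =>
      if a = b then a :: pvLoopA rest else a :: pvLoopA (b :: rest)

def fix_doubled_chars (text : String) : String :=
  String.ofList (pvLoopA text.toList)

-- ===== PORT B =====
-- B's run loop: inner scan (takeWhile) finds the maximal run, emit ceil(L/2) copies, continue after it.
def pvLoopB : List Char → List Char
  | [] => []
  | c :: rest =>
      let run := rest.takeWhile (· = c)
      let l := 1 + run.length
      List.replicate ((l + 1) / 2) c ++ pvLoopB (rest.dropWhile (· = c))
termination_by l => l.length
decreasing_by
  have := List.length_dropWhile_le (p := (· = c)) (l := rest)
  simp only [List.length_cons]; omega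

def fix_doubled_chars_alt (text : String) : String :=
  String.ofList (pvLoopB text.toList)

-- ===== PRECONDITION & SPEC =====
def Spec_fix_doubled_chars (text : String) (out : String) : Prop := out = fix_doubled_chars_alt text
instance (text : String) (out : String) : Decidable (Spec_fix_doubled_chars text out) := by unfold Spec_fix_doubled_chars; infer_instance

-- ===== CLAIM (what is proved, stated in full; the proofs are below) =====
def Claim_equal_fix_doubled_chars : Prop := ∀ (text : String), Dom_fix_doubled_chars text → Spec_fix_doubled_chars text (fix_doubled_chars text)

-- ===== LEMMAS AND PROOFS =====

-- A on a maximal run: replicate k c (with rest not starting with c) yields ceil(k/2) copies of c.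
theorem pvLoopA_replicate (k : Nat) (c : Char) (rest : List Char)
    (h : ∀ r t, rest = r :: t → r ≠ c) :
    pvLoopA (List.replicate k c ++ rest) = List.replicate ((k + 1) / 2) c ++ pvLoopA rest := by
  induction k using Nat.strong_induction_on with
  | _ k ih =>
    match k with
    | 0 => simp
    | 1 =>
      cases rest with
      | nil => simp [pvLoopA]
      | cons b t =>
        have hb : b ≠ c := h b t rfl
        show pvLoopA (c :: b :: t) = _
        rw [pvLoopA, if_neg (fun hcb => hb hcb.symm)]
        simp
    | (m + 2) =>
      have : pvLoopA (List.replicate (m + 2) c ++ rest)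
          = c :: pvLoopA (List.replicate m c ++ rest) := by
        simp [List.replicate_succ, pvLoopA]
      rw [this, ih m (by omega) ]
      have : (m + 2 + 1) / 2 = (m + 1) / 2 + 1 := by omega
      rw [this]
      simp [List.replicate_succ]

theorem pvLoopB_cons (c : Char) (rest : List Char) :
    pvLoopB (c :: rest)
      = List.replicate ((1 + (rest.takeWhile (· = c)).length + 1) / 2) c
          ++ pvLoopB (rest.dropWhile (· = c)) := by
  rw [pvLoopB.eq_def]

theorem pvLoopA_eq_pvLoopB (l : List Char) : pvLoopA l = pvLoopB l := by
  induction hn : l.length using Nat.strong_induction_on generalizing l with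
  | _ n ih =>
  cases l with
  | nil => rw [pvLoopB.eq_def]; rfl
  | cons c rest =>
    have hdec : c :: rest
        = List.replicate (1 + (rest.takeWhile (· = c)).length) c ++ rest.dropWhile (· = c) := by
      have htw : rest.takeWhile (· = c) = List.replicate (rest.takeWhile (· = c)).length c := by
        apply List.eq_replicate_of_mem
        intro b hb
        simpa using List.mem_takeWhile_imp hb
      rw [Nat.add_comm, List.replicate_succ, List.cons_append]
      congr 1
      rw [← htw]
      exact (List.takeWhile_append_dropWhile (p := (· = c)) (l := rest)).symm
    have hhead : ∀ r t, rest.dropWhile (· = c) = r :: t → r ≠ c := by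
      intro r t hrt
      have := List.head?_dropWhile_not (p := (· = c)) (l := rest)
      rw [hrt] at this
      simpa using this
    conv_lhs => rw [hdec]
    rw [pvLoopA_replicate _ _ _ hhead, pvLoopB_cons]
    congr 1
    exact ih (rest.dropWhile (· = c)).length
        (by subst hn
            have := List.length_dropWhile_le (p := (· = c)) (l := rest)
            simp only [List.length_cons]; omega) _ rfl

-- ===== VERDICT (by name: the statement is the Claim_ definition above) =====
theorem fix_doubled_chars_spec : Claim_equal_fix_doubled_chars := by
  intro text _
  show _ = _
  unfold fix_doubled_chars fix_doubled_chars_alt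
  rw [pvLoopA_eq_pvLoopB]
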